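-- pv_equiv track=rewrite | github.com/yhw320/PanSyn | scripts/synphoni/infer_chr_fusion.py | power_sets_binary
-- ===== SOURCE A (Python) =====
-- def power_sets_binary(items, min_len=1, max_len=0):
--     res = []
--     if max_len == 0:
--         max_len = len(items)
--     N = len(items)
--     for i in range(2 ** N):
--         zj = []
--         for j in range(N):
--             if (i >> j) % 2 == 1:
--                 zj.append(items[j])
--         res.append(zj)
--     return [i for i in res if max_len >= len(i) >= min_len]
-- ===== SOURCE B (Python) =====
-- def power_sets_binary(items, min_len=1, max_len=0):
--     if max_len == 0:
--         max_len = len(items)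
--     # doubling construction: subsets appear in the same (bitmask-counting) order
--     # as A's enumeration, without the inner per-bit loop
--     subsets = [[]]
--     for x in items:
--         subsets = subsets + [s + [x] for s in subsets]
--     return [s for s in subsets if min_len <= len(s) <= max_len]
-- ===== Notes on version B (the rewrite author's own statement) =====
-- stated objective: faster
-- what changed: Replaces the bitmask enumeration (inner loop over all N bit positions for each of the 2^N masks) by the iterative doubling construction, which emits the same subsets in the same counting order with no per-bit work.
import Mathlib
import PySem

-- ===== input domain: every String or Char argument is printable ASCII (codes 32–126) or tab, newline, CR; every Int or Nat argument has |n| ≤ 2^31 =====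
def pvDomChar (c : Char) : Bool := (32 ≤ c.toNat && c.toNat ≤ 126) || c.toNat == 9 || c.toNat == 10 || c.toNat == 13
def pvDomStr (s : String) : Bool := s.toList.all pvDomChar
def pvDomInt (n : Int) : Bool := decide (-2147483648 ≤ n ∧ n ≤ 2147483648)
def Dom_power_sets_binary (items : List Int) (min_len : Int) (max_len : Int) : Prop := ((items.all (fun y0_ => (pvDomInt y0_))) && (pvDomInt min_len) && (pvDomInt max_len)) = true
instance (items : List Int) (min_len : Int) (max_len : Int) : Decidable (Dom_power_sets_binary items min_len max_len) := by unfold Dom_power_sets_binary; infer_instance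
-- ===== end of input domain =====

-- B replaces A's 2^N bitmask scan (inner loop over all N bit positions per subset) by the
-- standard doubling construction, which emits the subsets in the same counting order;
-- objective: alternative/simpler.

-- ===== PORT A =====
-- inner loop "for j in range(N): if (i >> j) % 2 == 1: zj.append(items[j])";
-- j ranges over valid indices of items, so items[j] = items.getD j 0 exactly;
-- i ≥ 0 throughout, so Nat >>> matches Python's >> exactly.
def pvBitsA (i : Nat) (items : List Int) : List Int :=
  (List.range items.length).foldl
    (fun zj j => if (i >>> j) % 2 == 1 then zj ++ [items.getD j 0] else zj) []

def power_sets_binary (items : List Int) (min_len : Int) (max_len : Int) : List (List Int) :=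
  let max_len := if max_len = 0 then (items.length : Int) else max_len
  let N := items.length
  let res := (List.range (2 ^ N)).foldl (fun res i => res ++ [pvBitsA i items]) []
  res.filter (fun i => decide (max_len ≥ (i.length : Int) ∧ (i.length : Int) ≥ min_len))

-- ===== PORT B =====
def power_sets_binary_alt (items : List Int) (min_len : Int) (max_len : Int) : List (List Int) :=
  let max_len := if max_len = 0 then (items.length : Int) else max_len
  let subsets := items.foldl (fun subsets x => subsets ++ subsets.map (fun s => s ++ [x])) [[]]
  subsets.filter (fun s => decide (min_len ≤ (s.length : Int) ∧ (s.length : Int) ≤ max_len))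

-- ===== PRECONDITION & SPEC =====
def Spec_power_sets_binary (items : List Int) (min_len : Int) (max_len : Int) (out : List (List Int)) : Prop := out = power_sets_binary_alt items min_len max_len
instance (items : List Int) (min_len : Int) (max_len : Int) (out : List (List Int)) : Decidable (Spec_power_sets_binary items min_len max_len out) := by unfold Spec_power_sets_binary; infer_instance

-- ===== CLAIM (what is proved, stated in full; the proofs are below) =====
def Claim_equal_power_sets_binary : Prop := ∀ (items : List Int) (min_len : Int) (max_len : Int), Dom_power_sets_binary items min_len max_len → Spec_power_sets_binary items min_len max_len (power_sets_binary items min_len max_len)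

-- ===== LEMMAS AND PROOFS =====

lemma foldl_snoc_map {α β : Type} (f : α → β) (xs : List α) (acc : List β) :
    xs.foldl (fun r i => r ++ [f i]) acc = acc ++ xs.map f := by
  induction xs generalizing acc with
  | nil => simp
  | cons y ys ih => simp [ih]

lemma bitsFold_congr (f g : List Int → Nat → List Int) (m : Nat) (acc : List Int)
    (h : ∀ zj j, j < m → f zj j = g zj j) :
    (List.range m).foldl f acc = (List.range m).foldl g acc := by
  induction m with
  | zero => rfl
  | succ k ih =>
      rw [List.range_succ, List.foldl_append, List.foldl_append,
        ih (fun zj j hj => h zj j (Nat.lt_succ_of_lt hj))]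
      simp [h _ k (Nat.lt_succ_self k)]

lemma shift_mod_two_add (n i j : Nat) (hj : j < n) :
    ((2 ^ n + i) >>> j) % 2 = (i >>> j) % 2 := by
  rw [Nat.shiftRight_eq_div_pow, Nat.shiftRight_eq_div_pow]
  have h2 : 2 ^ n = 2 ^ (n - j) * 2 ^ j := by
    rw [← pow_add]; congr 1; omega
  rw [h2, mul_comm, Nat.mul_add_div (Nat.two_pow_pos j)]
  have he : 2 ^ (n - j) = 2 * 2 ^ (n - j - 1) := by
    rw [← pow_succ']; congr 1; omega
  omega

lemma bits_append_lt (i : Nat) (l : List Int) (x : Int) (h : i < 2 ^ l.length) :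
    pvBitsA i (l ++ [x]) = pvBitsA i l := by
  unfold pvBitsA
  rw [List.length_append, List.length_singleton, List.range_succ, List.foldl_append]
  rw [bitsFold_congr _ (fun zj j => if (i >>> j) % 2 == 1 then zj ++ [l.getD j 0] else zj) _ _
    (fun zj j hj => by rw [List.getD_append _ _ _ _ hj])]
  have h0 : i >>> l.length = 0 := by
    rw [Nat.shiftRight_eq_div_pow]; exact Nat.div_eq_of_lt h
  simp [h0]

lemma bits_append_ge (i : Nat) (l : List Int) (x : Int) (h : i < 2 ^ l.length) :
    pvBitsA (2 ^ l.length + i) (l ++ [x]) = pvBitsA i l ++ [x] := by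
  unfold pvBitsA
  rw [List.length_append, List.length_singleton, List.range_succ, List.foldl_append]
  rw [bitsFold_congr _ (fun zj j => if (i >>> j) % 2 == 1 then zj ++ [l.getD j 0] else zj) _ _
    (fun zj j hj => by rw [List.getD_append _ _ _ _ hj, shift_mod_two_add _ _ _ hj])]
  have h1 : ((2 ^ l.length + i) >>> l.length) % 2 = 1 := by
    rw [Nat.shiftRight_eq_div_pow, Nat.add_comm, Nat.add_div_right _ (Nat.two_pow_pos _),
      Nat.div_eq_of_lt h]
  simp [h1]

lemma mapBits_eq_doubling (l : List Int) :
    (List.range (2 ^ l.length)).map (fun i => pvBitsA i l)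
      = l.foldl (fun subs x => subs ++ subs.map (fun s => s ++ [x])) [[]] := by
  induction l using List.reverseRecOn with
  | nil => decide
  | append_singleton l x ih =>
      rw [List.foldl_append]
      rw [List.length_append, List.length_singleton, pow_succ, mul_two, List.range_add,
        List.map_append, List.map_map]
      rw [List.map_congr_left (fun i hi => bits_append_lt i l x (List.mem_range.mp hi))]
      have h2 : List.map ((fun i => pvBitsA i (l ++ [x])) ∘ fun i => 2 ^ l.length + i)
          (List.range (2 ^ l.length))
          = List.map (fun i => pvBitsA i l ++ [x]) (List.range (2 ^ l.length)) :=
        List.map_congr_left (fun i hi => bits_append_ge i l x (List.mem_range.mp hi))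
      rw [h2]
      have h3 : List.map (fun i => pvBitsA i l ++ [x]) (List.range (2 ^ l.length))
          = List.map (fun s => s ++ [x]) (List.map (fun i => pvBitsA i l) (List.range (2 ^ l.length))) := by
        rw [List.map_map]; rfl
      rw [h3, ih]
      simp

lemma filter_pred_eq (mn mx : Int) :
    (fun (i : List Int) => decide (mx ≥ (i.length : Int) ∧ (i.length : Int) ≥ mn))
      = (fun (s : List Int) => decide (mn ≤ (s.length : Int) ∧ (s.length : Int) ≤ mx)) := by
  funext s
  exact decide_eq_decide.mpr ⟨fun h => ⟨h.2, h.1⟩, fun h => ⟨h.2, h.1⟩⟩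

-- ===== VERDICT (by name: the statement is the Claim_ definition above) =====
theorem power_sets_binary_spec : Claim_equal_power_sets_binary := by
  intro items min_len max_len _
  unfold Spec_power_sets_binary power_sets_binary power_sets_binary_alt
  dsimp only
  rw [foldl_snoc_map, List.nil_append, mapBits_eq_doubling, filter_pred_eq]
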